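-- pv_equiv track=rewrite | github.com/jellyfrostt/proteoform-insight | pages/2_proteoform.py | render_coverage_html
-- ===== SOURCE A (Python) =====
-- def render_coverage_html(residues, n_matched, c_matched):
--     """Render ProSight Lite-style sequence coverage HTML.
--
--     Red = N-terminal (a/b/c), Blue = C-terminal (x/y/z), Green = both.
--     """
--     n = len(residues)
--     html = '<div style="font-family:monospace;line-height:2.0;margin:10px 0;">'
--
--     # N-terminal markers (above)
--     html += '<div style="height:18px;">'
--     for i in range(n):
--         if i in n_matched:
--             html += (
--                 '<span style="display:inline-block;width:18px;text-align:center;'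
--                 'color:#E74C3C;font-size:10px;">&#9660;</span>'
--             )
--         else:
--             html += '<span style="display:inline-block;width:18px;">&nbsp;</span>'
--         if (i + 1) % 10 == 0:
--             html += '<span style="display:inline-block;width:24px;">&nbsp;</span>'
--     html += '</div>'
--
--     # Residues
--     html += '<div>'
--     for i, res in enumerate(residues):
--         both = i in n_matched and i in c_matched
--         nterm = i in n_matched
--         cterm = i in c_matched
--         if both:
--             bg, fg = "#27ae60", "white"
--         elif nterm:
--             bg, fg = "#E74C3C", "white"
--         elif cterm:
--             bg, fg = "#3498DB", "white"
--         else: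
--             bg, fg = "#f0f0f0", "#aaa"
--         html += (
--             f'<span style="display:inline-block;width:18px;text-align:center;'
--             f'background:{bg};color:{fg};font-size:13px;font-weight:bold;'
--             f'border-radius:2px;">{res}</span>'
--         )
--         if (i + 1) % 10 == 0:
--             html += (
--                 f'<span style="display:inline-block;width:24px;text-align:center;'
--                 f'color:#bbb;font-size:9px;">{i+1}</span>'
--             )
--     html += '</div>'
--
--     # C-terminal markers (below)
--     html += '<div style="height:18px;">'
--     for i in range(n):
--         if i in c_matched:
--             html += (
--                 '<span style="display:inline-block;width:18px;text-align:center;'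
--                 'color:#3498DB;font-size:10px;">&#9650;</span>'
--             )
--         else:
--             html += '<span style="display:inline-block;width:18px;">&nbsp;</span>'
--         if (i + 1) % 10 == 0:
--             html += '<span style="display:inline-block;width:24px;">&nbsp;</span>'
--     html += '</div></div>'
--
--     return html
-- ===== SOURCE B (Python) =====
-- def render_coverage_html(residues, n_matched, c_matched):
--     """Render ProSight Lite-style sequence coverage HTML (single-pass version).
--
--     Red = N-terminal (a/b/c), Blue = C-terminal (x/y/z), Green = both.
--     """
--     nbuf = ''
--     rbuf = ''
--     cbuf = ''
--     for i, res in enumerate(residues):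
--         nterm = i in n_matched
--         cterm = i in c_matched
--         nbuf += (
--             '<span style="display:inline-block;width:18px;text-align:center;'
--             'color:#E74C3C;font-size:10px;">&#9660;</span>'
--             if nterm else
--             '<span style="display:inline-block;width:18px;">&nbsp;</span>'
--         )
--         if nterm and cterm:
--             bg, fg = "#27ae60", "white"
--         elif nterm:
--             bg, fg = "#E74C3C", "white"
--         elif cterm:
--             bg, fg = "#3498DB", "white"
--         else:
--             bg, fg = "#f0f0f0", "#aaa"
--         rbuf += (
--             f'<span style="display:inline-block;width:18px;text-align:center;'
--             f'background:{bg};color:{fg};font-size:13px;font-weight:bold;'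
--             f'border-radius:2px;">{res}</span>'
--         )
--         cbuf += (
--             '<span style="display:inline-block;width:18px;text-align:center;'
--             'color:#3498DB;font-size:10px;">&#9650;</span>'
--             if cterm else
--             '<span style="display:inline-block;width:18px;">&nbsp;</span>'
--         )
--         if (i + 1) % 10 == 0:
--             nbuf += '<span style="display:inline-block;width:24px;">&nbsp;</span>'
--             rbuf += (
--                 f'<span style="display:inline-block;width:24px;text-align:center;'
--                 f'color:#bbb;font-size:9px;">{i+1}</span>'
--             )
--             cbuf += '<span style="display:inline-block;width:24px;">&nbsp;</span>'
--     return (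
--         '<div style="font-family:monospace;line-height:2.0;margin:10px 0;">'
--         + '<div style="height:18px;">' + nbuf + '</div>'
--         + '<div>' + rbuf + '</div>'
--         + '<div style="height:18px;">' + cbuf + '</div></div>'
--     )
-- ===== Notes on version B (the rewrite author's own statement) =====
-- stated objective: alternative
-- what changed: A's three sequential scans over the sequence (N-marker row, residue row, C-marker row) are fused into one pass that maintains three string buffers and tests membership once per index, assembled into the same markup at the end.
import Mathlib
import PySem

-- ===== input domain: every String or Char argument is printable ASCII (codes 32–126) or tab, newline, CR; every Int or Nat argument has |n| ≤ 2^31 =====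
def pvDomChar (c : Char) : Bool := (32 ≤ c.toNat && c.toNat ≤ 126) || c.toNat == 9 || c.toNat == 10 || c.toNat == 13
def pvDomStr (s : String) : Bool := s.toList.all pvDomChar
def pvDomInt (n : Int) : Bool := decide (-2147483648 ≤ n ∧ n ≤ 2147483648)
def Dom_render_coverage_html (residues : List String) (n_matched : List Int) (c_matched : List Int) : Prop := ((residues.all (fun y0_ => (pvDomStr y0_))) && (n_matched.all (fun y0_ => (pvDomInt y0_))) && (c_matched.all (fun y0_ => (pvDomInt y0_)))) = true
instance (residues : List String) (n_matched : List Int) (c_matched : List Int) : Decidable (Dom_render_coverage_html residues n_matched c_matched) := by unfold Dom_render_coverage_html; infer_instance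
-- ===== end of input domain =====

-- B fuses A's three sequential scans (N-marker row, residue row, C-marker row) into a
-- single pass over enumerate(residues) maintaining three string buffers (objective: alternative).

-- Shared HTML literals (identical string constants in both Python sources)
def pvOuter : String := "<div style=\"font-family:monospace;line-height:2.0;margin:10px 0;\">"
def pvH18 : String := "<div style=\"height:18px;\">"
def pvNHit : String := "<span style=\"display:inline-block;width:18px;text-align:center;color:#E74C3C;font-size:10px;\">&#9660;</span>"
def pvCHit : String := "<span style=\"display:inline-block;width:18px;text-align:center;color:#3498DB;font-size:10px;\">&#9650;</span>"
def pvBlank18 : String := "<span style=\"display:inline-block;width:18px;\">&nbsp;</span>"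
def pvBlank24 : String := "<span style=\"display:inline-block;width:24px;\">&nbsp;</span>"
def pvResSpan (bg fg res : String) : String :=
  "<span style=\"display:inline-block;width:18px;text-align:center;background:" ++ bg ++ ";color:" ++ fg ++ ";font-size:13px;font-weight:bold;border-radius:2px;\">" ++ res ++ "</span>"
def pvNumSpan (i : Int) : String :=
  "<span style=\"display:inline-block;width:24px;text-align:center;color:#bbb;font-size:9px;\">" ++ PySem.Int.toStr (i + 1) ++ "</span>"

-- ===== PORT A =====
def render_coverage_html (residues : List String) (n_matched : List Int) (c_matched : List Int) : String :=
  let n : Int := PySem.List.len residues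
  let html := pvOuter
  -- N-terminal markers (above)
  let html := html ++ pvH18
  let html := (PySem.List.pyRange 0 n 1).foldl (fun html i =>
      let html := if n_matched.contains i then html ++ pvNHit else html ++ pvBlank18
      if PySem.Int.mod (i + 1) 10 == 0 then html ++ pvBlank24 else html) html
  let html := html ++ "</div>"
  -- Residues
  let html := html ++ "<div>"
  let html := (PySem.List.enumerate residues).foldl (fun html p =>
      let i := p.1
      let res := p.2
      let both := n_matched.contains i && c_matched.contains i
      let nterm := n_matched.contains i
      let cterm := c_matched.contains i
      let bgfg := if both then ("#27ae60", "white")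
                  else if nterm then ("#E74C3C", "white")
                  else if cterm then ("#3498DB", "white")
                  else ("#f0f0f0", "#aaa")
      let html := html ++ pvResSpan bgfg.1 bgfg.2 res
      if PySem.Int.mod (i + 1) 10 == 0 then html ++ pvNumSpan i else html) html
  let html := html ++ "</div>"
  -- C-terminal markers (below)
  let html := html ++ pvH18
  let html := (PySem.List.pyRange 0 n 1).foldl (fun html i =>
      let html := if c_matched.contains i then html ++ pvCHit else html ++ pvBlank18
      if PySem.Int.mod (i + 1) 10 == 0 then html ++ pvBlank24 else html) html
  html ++ "</div></div>"

-- ===== PORT B =====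
def render_coverage_html_alt (residues : List String) (n_matched : List Int) (c_matched : List Int) : String :=
  let bufs := (PySem.List.enumerate residues).foldl
    (fun (bufs : String × String × String) p =>
      let i := p.1
      let res := p.2
      let nterm := n_matched.contains i
      let cterm := c_matched.contains i
      let nbuf := bufs.1 ++ (if nterm then pvNHit else pvBlank18)
      let bgfg := if nterm && cterm then ("#27ae60", "white")
                  else if nterm then ("#E74C3C", "white")
                  else if cterm then ("#3498DB", "white")
                  else ("#f0f0f0", "#aaa")
      let rbuf := bufs.2.1 ++ pvResSpan bgfg.1 bgfg.2 res
      let cbuf := bufs.2.2 ++ (if cterm then pvCHit else pvBlank18)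
      if PySem.Int.mod (i + 1) 10 == 0 then
        (nbuf ++ pvBlank24, rbuf ++ pvNumSpan i, cbuf ++ pvBlank24)
      else
        (nbuf, rbuf, cbuf)) ("", "", "")
  pvOuter ++ pvH18 ++ bufs.1 ++ "</div>" ++ "<div>" ++ bufs.2.1 ++ "</div>" ++ pvH18 ++ bufs.2.2 ++ "</div></div>"

-- ===== PRECONDITION & SPEC =====
def Spec_render_coverage_html (residues : List String) (n_matched : List Int) (c_matched : List Int) (out : String) : Prop := out = render_coverage_html_alt residues n_matched c_matched
instance (residues : List String) (n_matched : List Int) (c_matched : List Int) (out : String) : Decidable (Spec_render_coverage_html residues n_matched c_matched out) := by unfold Spec_render_coverage_html; infer_instance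

-- ===== CLAIM (what is proved, stated in full; the proofs are below) =====
def Claim_equal_render_coverage_html : Prop := ∀ (residues : List String) (n_matched : List Int) (c_matched : List Int), Dom_render_coverage_html residues n_matched c_matched → Spec_render_coverage_html residues n_matched c_matched (render_coverage_html residues n_matched c_matched)

-- ===== LEMMAS AND PROOFS =====

-- per-index fragments of each row
def fragN (n_matched : List Int) (i : Int) : String :=
  (if n_matched.contains i then pvNHit else pvBlank18) ++
  (if PySem.Int.mod (i + 1) 10 == 0 then pvBlank24 else "")

def fragC (c_matched : List Int) (i : Int) : String :=
  (if c_matched.contains i then pvCHit else pvBlank18) ++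
  (if PySem.Int.mod (i + 1) 10 == 0 then pvBlank24 else "")

def fragR (n_matched c_matched : List Int) (p : Int × String) : String :=
  (let bgfg := if n_matched.contains p.1 && c_matched.contains p.1 then ("#27ae60", "white")
               else if n_matched.contains p.1 then ("#E74C3C", "white")
               else if c_matched.contains p.1 then ("#3498DB", "white")
               else ("#f0f0f0", "#aaa")
   pvResSpan bgfg.1 bgfg.2 p.2) ++
  (if PySem.Int.mod (p.1 + 1) 10 == 0 then pvNumSpan p.1 else "")

theorem foldl_str_pull {α : Type} (g : α → String) :
    ∀ (l : List α) (a b : String),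
      l.foldl (fun acc x => acc ++ g x) (a ++ b) = a ++ l.foldl (fun acc x => acc ++ g x) b := by
  intro l
  induction l with
  | nil => intro a b; rfl
  | cons x xs ih =>
      intro a b
      simp only [List.foldl_cons, String.append_assoc]
      exact ih a (b ++ g x)

theorem foldl_str_init {α : Type} (g : α → String) (l : List α) (a : String) :
    l.foldl (fun acc x => acc ++ g x) a = a ++ l.foldl (fun acc x => acc ++ g x) "" := by
  have := foldl_str_pull g l a ""
  rwa [String.append_empty] at this

theorem bodyN_eq (n_matched : List Int) :
    (fun (html : String) (i : Int) =>
      let html := if n_matched.contains i then html ++ pvNHit else html ++ pvBlank18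
      if PySem.Int.mod (i + 1) 10 == 0 then html ++ pvBlank24 else html)
    = fun acc i => acc ++ fragN n_matched i := by
  funext acc i
  simp only [fragN]
  split_ifs <;> simp [String.append_assoc, String.append_empty]

theorem bodyC_eq (c_matched : List Int) :
    (fun (html : String) (i : Int) =>
      let html := if c_matched.contains i then html ++ pvCHit else html ++ pvBlank18
      if PySem.Int.mod (i + 1) 10 == 0 then html ++ pvBlank24 else html)
    = fun acc i => acc ++ fragC c_matched i := by
  funext acc i
  simp only [fragC]
  split_ifs <;> simp [String.append_assoc, String.append_empty]

theorem bodyR_eq (n_matched c_matched : List Int) :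
    (fun (html : String) (p : Int × String) =>
      let i := p.1
      let res := p.2
      let both := n_matched.contains i && c_matched.contains i
      let nterm := n_matched.contains i
      let cterm := c_matched.contains i
      let bgfg := if both then ("#27ae60", "white")
                  else if nterm then ("#E74C3C", "white")
                  else if cterm then ("#3498DB", "white")
                  else ("#f0f0f0", "#aaa")
      let html := html ++ pvResSpan bgfg.1 bgfg.2 res
      if PySem.Int.mod (i + 1) 10 == 0 then html ++ pvNumSpan i else html)
    = fun acc p => acc ++ fragR n_matched c_matched p := by
  funext acc p
  simp only [fragR]
  split_ifs <;> simp [String.append_assoc, String.append_empty]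

-- B's loop body, as a function of the buffer triple
theorem bodyB_eq (n_matched c_matched : List Int) :
    (fun (bufs : String × String × String) (p : Int × String) =>
      let i := p.1
      let res := p.2
      let nterm := n_matched.contains i
      let cterm := c_matched.contains i
      let nbuf := bufs.1 ++ (if nterm then pvNHit else pvBlank18)
      let bgfg := if nterm && cterm then ("#27ae60", "white")
                  else if nterm then ("#E74C3C", "white")
                  else if cterm then ("#3498DB", "white")
                  else ("#f0f0f0", "#aaa")
      let rbuf := bufs.2.1 ++ pvResSpan bgfg.1 bgfg.2 res
      let cbuf := bufs.2.2 ++ (if cterm then pvCHit else pvBlank18)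
      if PySem.Int.mod (i + 1) 10 == 0 then
        (nbuf ++ pvBlank24, rbuf ++ pvNumSpan i, cbuf ++ pvBlank24)
      else
        (nbuf, rbuf, cbuf))
    = fun bufs p => (bufs.1 ++ fragN n_matched p.1,
                     bufs.2.1 ++ fragR n_matched c_matched p,
                     bufs.2.2 ++ fragC c_matched p.1) := by
  funext bufs p
  simp only [fragN, fragR, fragC]
  split_ifs <;> simp [String.append_assoc, String.append_empty]

-- B's single fold splits into the three row folds
theorem trip (n_matched c_matched : List Int) :
    ∀ (l : List (Int × String)) (a b c : String),
      l.foldl (fun (bufs : String × String × String) p =>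
          (bufs.1 ++ fragN n_matched p.1,
           bufs.2.1 ++ fragR n_matched c_matched p,
           bufs.2.2 ++ fragC c_matched p.1)) (a, b, c)
      = (l.foldl (fun acc p => acc ++ fragN n_matched p.1) a,
         l.foldl (fun acc p => acc ++ fragR n_matched c_matched p) b,
         l.foldl (fun acc p => acc ++ fragC c_matched p.1) c) := by
  intro l
  induction l with
  | nil => intro a b c; rfl
  | cons x xs ih =>
      intro a b c
      simp only [List.foldl_cons]
      exact ih _ _ _

-- the N/C row folds over enumerate equal A's folds over pyRange
theorem enum_proj_foldN (residues : List String) (n_matched : List Int) (a : String) :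
    (PySem.List.enumerate residues).foldl (fun acc p => acc ++ fragN n_matched p.1) a
    = (PySem.List.pyRange 0 (PySem.List.len residues) 1).foldl (fun acc i => acc ++ fragN n_matched i) a := by
  rw [PySem.List.enumerate_eq_map_pyRange (d := ""), List.foldl_map]

theorem enum_proj_foldC (residues : List String) (c_matched : List Int) (a : String) :
    (PySem.List.enumerate residues).foldl (fun acc p => acc ++ fragC c_matched p.1) a
    = (PySem.List.pyRange 0 (PySem.List.len residues) 1).foldl (fun acc i => acc ++ fragC c_matched i) a := by
  rw [PySem.List.enumerate_eq_map_pyRange (d := ""), List.foldl_map]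

-- ===== VERDICT (by name: the statement is the Claim_ definition above) =====
theorem render_coverage_html_spec : Claim_equal_render_coverage_html := by
  intro residues n_matched c_matched _
  show render_coverage_html residues n_matched c_matched = render_coverage_html_alt residues n_matched c_matched
  unfold render_coverage_html render_coverage_html_alt
  rw [bodyN_eq, bodyC_eq, bodyR_eq, bodyB_eq, trip, enum_proj_foldN, enum_proj_foldC]
  simp only []
  conv_lhs => rw [foldl_str_init (fun i => fragN n_matched i)]
  conv_lhs => rw [foldl_str_init (fun p => fragR n_matched c_matched p)]
  conv_lhs => rw [foldl_str_init (fun i => fragC c_matched i)]
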